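-- pv_equiv track=rewrite | github.com/daniel-reich/turbo-robot | 9HWMgvjF7p3zhWBdk_13.py | keys_and_values
-- ===== SOURCE A (Python) =====
-- def keys_and_values(d):
--   d_list = []
--   for k, v in d.items():
--     d_list.append({"key": k, "val": v})
--   newlist = sorted(d_list, key=lambda k: k['key'])
--   k_list = [x['key'] for x in newlist]
--   v_list = [x['val'] for x in newlist]
--   return [k_list, v_list]
-- ===== SOURCE B (Python) =====
-- def keys_and_values(d):
--   def merge(xs, ys):
--     out = []
--     i = j = 0
--     while i < len(xs) and j < len(ys):
--       if xs[i] <= ys[j]: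
--         out.append(xs[i]); i += 1
--       else:
--         out.append(ys[j]); j += 1
--     out.extend(xs[i:])
--     out.extend(ys[j:])
--     return out
--
--   def msort(ks):
--     if len(ks) <= 1:
--       return ks
--     mid = len(ks) // 2
--     return merge(msort(ks[:mid]), msort(ks[mid:]))
--
--   k_list = msort(list(d))
--   v_list = [d[k] for k in k_list]
--   return [k_list, v_list]
-- ===== Notes on version B (the rewrite author's own statement) =====
-- stated objective: alternative
-- what changed: Instead of building {'key','val'} records, library-sorting them by the key field and splitting them back into two lists, B merge-sorts the keys with a hand-written recursive merge sort and then builds the value list by dictionary lookup.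
import Mathlib
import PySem

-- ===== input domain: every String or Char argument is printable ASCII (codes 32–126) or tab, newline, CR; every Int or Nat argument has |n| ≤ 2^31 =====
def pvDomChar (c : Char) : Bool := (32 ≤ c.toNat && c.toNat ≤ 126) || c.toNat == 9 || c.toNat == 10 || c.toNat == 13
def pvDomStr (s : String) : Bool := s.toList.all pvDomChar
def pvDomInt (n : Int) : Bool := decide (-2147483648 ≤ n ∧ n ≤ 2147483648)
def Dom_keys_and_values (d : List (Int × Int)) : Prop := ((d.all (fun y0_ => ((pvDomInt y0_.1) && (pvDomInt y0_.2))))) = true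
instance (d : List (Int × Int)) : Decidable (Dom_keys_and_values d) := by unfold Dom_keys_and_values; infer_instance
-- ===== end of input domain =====

-- B merge-sorts the keys with a hand-written recursive merge sort and builds values
-- by lookup, instead of library-sorting {'key','val'} records and splitting them;
-- an alternative algorithm of the same asymptotic cost (no speed claim).


-- ===== PORT A =====
-- the association list models the Python dict: materialise its items (unique keys,
-- insertion order) via PySem.Dict.ofList; the {'key': k, 'val': v} record is the pair (k, v)
def keys_and_values (d : List (Int × Int)) : List (List Int) :=
  let d_list := (PySem.Dict.ofList d).items
  let newlist := PySem.List.sorted d_list (fun x => x.1) false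
  let k_list := newlist.map (fun x => x.1)
  let v_list := newlist.map (fun x => x.2)
  [k_list, v_list]

-- ===== PORT B =====
-- the Python two-pointer merge consumes the fronts of xs and ys; ported as the
-- standard recursive consumption of the same elements in the same order (exact)
def mergeKeys : List Int → List Int → List Int
  | [], ys => ys
  | x :: xs, [] => x :: xs
  | x :: xs, y :: ys =>
    if x ≤ y then x :: mergeKeys xs (y :: ys) else y :: mergeKeys (x :: xs) ys
termination_by xs ys => xs.length + ys.length

def msortKeys (ks : List Int) : List Int :=
  if ks.length ≤ 1 then ks
  else
    let mid := ks.length / 2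
    mergeKeys (msortKeys (ks.take mid)) (msortKeys (ks.drop mid))
termination_by ks.length
decreasing_by
  · simp only [List.length_take]; omega
  · simp only [List.length_drop]; omega

def keys_and_values_alt (d : List (Int × Int)) : List (List Int) :=
  let dd := PySem.Dict.ofList d
  let k_list := msortKeys dd.keys
  let v_list := k_list.map (fun k => dd.getD k 0)   -- d[k]: k is a key of dd, so no KeyError
  [k_list, v_list]

-- ===== PRECONDITION & SPEC =====
def Spec_keys_and_values (d : List (Int × Int)) (out : List (List Int)) : Prop := out = keys_and_values_alt d
instance (d : List (Int × Int)) (out : List (List Int)) : Decidable (Spec_keys_and_values d out) := by unfold Spec_keys_and_values; infer_instance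

-- ===== CLAIM (what is proved, stated in full; the proofs are below) =====
def Claim_equal_keys_and_values : Prop := ∀ (d : List (Int × Int)), Dom_keys_and_values d → Spec_keys_and_values d (keys_and_values d)

-- ===== LEMMAS AND PROOFS =====

theorem mergeKeys_perm (xs ys : List Int) : (mergeKeys xs ys).Perm (xs ++ ys) := by
  fun_induction mergeKeys xs ys with
  | case1 ys => simp
  | case2 x xs => simp
  | case3 x xs y ys hle ih =>
    exact ih.cons x
  | case4 x xs y ys hle ih =>
    exact (ih.cons y).trans (List.perm_middle (a := y) (l₁ := x :: xs) (l₂ := ys)).symm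

theorem mergeKeys_sorted (xs ys : List Int)
    (hx : xs.Pairwise (fun a b : Int => a ≤ b)) (hy : ys.Pairwise (fun a b : Int => a ≤ b)) :
    (mergeKeys xs ys).Pairwise (fun a b : Int => a ≤ b) := by
  fun_induction mergeKeys xs ys with
  | case1 ys => exact hy
  | case2 x xs => exact hx
  | case3 x xs y ys hle ih =>
    rcases List.pairwise_cons.mp hx with ⟨hxh, hxt⟩
    refine List.pairwise_cons.mpr ⟨?_, ih hxt hy⟩
    intro a ha
    have hm : a ∈ xs ++ (y :: ys) := (mergeKeys_perm xs (y :: ys)).mem_iff.mp ha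
    rcases List.mem_append.mp hm with h1 | h2
    · exact hxh a h1
    · rcases List.mem_cons.mp h2 with rfl | h3
      · exact hle
      · exact le_trans hle ((List.pairwise_cons.mp hy).1 a h3)
  | case4 x xs y ys hle ih =>
    rcases List.pairwise_cons.mp hy with ⟨hyh, hyt⟩
    refine List.pairwise_cons.mpr ⟨?_, ih hx hyt⟩
    intro a ha
    have hm : a ∈ (x :: xs) ++ ys := (mergeKeys_perm (x :: xs) ys).mem_iff.mp ha
    rcases List.mem_append.mp hm with h1 | h2
    · rcases List.mem_cons.mp h1 with rfl | h3
      · omega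
      · exact le_trans (by omega) ((List.pairwise_cons.mp hx).1 a h3)
    · exact hyh a h2

theorem msortKeys_perm (ks : List Int) : (msortKeys ks).Perm ks := by
  fun_induction msortKeys ks with
  | case1 ks h => exact List.Perm.refl ks
  | case2 ks h mid ih1 ih2 =>
    have := (mergeKeys_perm (msortKeys (ks.take mid))
      (msortKeys (ks.drop mid))).trans ((ih1.append ih2))
    simpa [List.take_append_drop] using this

theorem msortKeys_sorted (ks : List Int) :
    (msortKeys ks).Pairwise (fun a b : Int => a ≤ b) := by
  fun_induction msortKeys ks with
  | case1 ks h =>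
    match ks, h with
    | [], _ => simp
    | [x], _ => simp
  | case2 ks h mid ih1 ih2 =>
    exact mergeKeys_sorted _ _ ih1 ih2


theorem keys_and_values_eq (d : List (Int × Int)) :
    keys_and_values d = keys_and_values_alt d := by
  have hnd : (PySem.Dict.ofList d).keys.Nodup := PySem.Dict.nodup_keys_ofList d
  set dd := PySem.Dict.ofList d with hdd
  set ks := msortKeys dd.keys with hks
  have hperm : ks.Perm dd.keys := msortKeys_perm dd.keys
  have hnodup : ks.Nodup := hperm.nodup_iff.mpr hnd
  have hle : ks.Pairwise (fun a b : Int => a ≤ b) := msortKeys_sorted dd.keys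
  have hlt : ks.Pairwise (fun a b : Int => a < b) := by
    have := (List.pairwise_and_iff.mpr ⟨hle, hnodup⟩)
    exact this.imp (fun h => lt_of_le_of_ne h.1 h.2)
  have hitems : PySem.List.sorted dd.items (fun x => x.1) false
      = ks.map (fun k => (k, dd.getD k 0)) := by
    apply PySem.List.sorted_eq_of_perm_of_pairwise_lt
    · calc (ks.map fun k => (k, dd.getD k 0)).Perm (dd.keys.map fun k => (k, dd.getD k 0)) :=
            hperm.map _
        _ = dd.items := (PySem.Dict.items_eq_map_keys dd hnd 0).symm
    · exact hlt.map _ (fun a b h => h)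
  simp only [keys_and_values, keys_and_values_alt, ← hdd, ← hks, hitems,
    List.map_map, Function.comp_def]
  simp

-- ===== VERDICT (by name: the statement is the Claim_ definition above) =====
theorem keys_and_values_spec : Claim_equal_keys_and_values := by
  intro d _
  exact keys_and_values_eq d
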